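-- pv_equiv track=rewrite | github.com/k-harada/AtCoder | ABC/ABC1XX/ABC162/C.py | solve
-- ===== SOURCE A (Python) =====
-- import math
--
-- def solve(k):
--     res = 0
--     for a in range(1, k + 1):
--         for b in range(1, k + 1):
--             d = math.gcd(a, b)
--             for c in range(1, k + 1):
--                 res += math.gcd(c, d)
--     return res
-- ===== SOURCE B (Python) =====
-- import math
--
-- def solve(k):
--     # Precompute S(d) = sum of gcd(c, d) for c in 1..k once per d, then sum
--     # table[gcd(a, b)] over the k^2 pairs: O(k^2 log k) instead of O(k^3 log k).
--     table = [sum(math.gcd(c, d) for c in range(1, k + 1)) for d in range(0, k + 1)]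
--     return sum(table[math.gcd(a, b)]
--                for a in range(1, k + 1) for b in range(1, k + 1))
-- ===== Notes on version B (the rewrite author's own statement) =====
-- stated objective: faster
-- what changed: B precomputes a table S(d) = sum_c gcd(c,d) once per d and replaces A's innermost c-loop by a table lookup, turning the triple loop into a double loop.
import Mathlib
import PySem

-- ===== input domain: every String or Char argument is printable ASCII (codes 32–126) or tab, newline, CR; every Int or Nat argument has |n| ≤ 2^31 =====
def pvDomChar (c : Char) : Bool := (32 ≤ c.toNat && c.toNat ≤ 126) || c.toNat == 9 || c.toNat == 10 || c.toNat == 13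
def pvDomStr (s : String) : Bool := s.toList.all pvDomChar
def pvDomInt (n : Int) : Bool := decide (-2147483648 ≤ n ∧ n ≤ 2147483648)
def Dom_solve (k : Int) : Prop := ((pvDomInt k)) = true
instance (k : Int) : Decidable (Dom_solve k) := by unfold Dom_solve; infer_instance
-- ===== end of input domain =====

-- B precomputes the inner gcd-sum in a table, replacing A's innermost loop by a lookup (faster).
-- ===== PORT A =====
def solve (k : Int) : Int :=
  (PySem.List.pyRange 1 (k + 1) 1).foldl (fun res a =>
    (PySem.List.pyRange 1 (k + 1) 1).foldl (fun res b =>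
      let d : Int := (Int.gcd a b : Int)
      (PySem.List.pyRange 1 (k + 1) 1).foldl (fun res c =>
        res + (Int.gcd c d : Int)) res) res) 0

-- ===== PORT B =====
-- table[math.gcd(a, b)]: for a, b in 1..k the index 0 <= gcd(a,b) <= k is always in range,
-- so pyGetD (with an unused default) is exact here.
def solve_alt (k : Int) : Int :=
  let table : List Int :=
    (PySem.List.pyRange 0 (k + 1) 1).map (fun d =>
      ((PySem.List.pyRange 1 (k + 1) 1).map (fun c => (Int.gcd c d : Int))).sum)
  ((PySem.List.pyRange 1 (k + 1) 1).map (fun a =>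
    ((PySem.List.pyRange 1 (k + 1) 1).map (fun b =>
      PySem.List.pyGetD table ((Int.gcd a b : Int)) 0)).sum)).sum

-- ===== PRECONDITION & SPEC =====
def Spec_solve (k : Int) (out : Int) : Prop := out = solve_alt k
instance (k : Int) (out : Int) : Decidable (Spec_solve k out) := by unfold Spec_solve; infer_instance

-- ===== CLAIM (what is proved, stated in full; the proofs are below) =====
def Claim_equal_solve : Prop := ∀ (k : Int), Dom_solve k → Spec_solve k (solve k)

-- ===== LEMMAS AND PROOFS =====

-- table lookup at an in-range index g equals the precomputed inner sum
theorem pv_table_lookup (k g : Int) (h0 : 0 ≤ g) (h1 : g < k + 1) :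
    PySem.List.pyGetD
      ((PySem.List.pyRange 0 (k + 1) 1).map (fun d =>
        ((PySem.List.pyRange 1 (k + 1) 1).map (fun c => (Int.gcd c d : Int))).sum)) g 0
      = ((PySem.List.pyRange 1 (k + 1) 1).map (fun c => (Int.gcd c g : Int))).sum := by
  exact PySem.List.pyGetD_map_pyRange_of_nonneg _ _ _ _ h0 h1

-- gcd of two elements of 1..k lies in 0..k
theorem pv_gcd_bound (k a b : Int) (ha : a ∈ PySem.List.pyRange 1 (k + 1) 1) :
    (0 : Int) ≤ (Int.gcd a b : Int) ∧ (Int.gcd a b : Int) < k + 1 := by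
  rw [PySem.List.mem_pyRange_one] at ha
  refine ⟨by exact_mod_cast Nat.zero_le _, ?_⟩
  have h1 : Int.gcd a b ≤ a.natAbs := Nat.gcd_le_left _ (by omega : 0 < a.natAbs)
  have h2 : (a.natAbs : Int) = a := Int.natAbs_of_nonneg (by omega)
  omega

-- A's triple foldl collapses, level by level, to the triple mapped sum
theorem pv_solve_eq_sum (k : Int) :
    solve k = ((PySem.List.pyRange 1 (k + 1) 1).map (fun a =>
      ((PySem.List.pyRange 1 (k + 1) 1).map (fun b =>
        ((PySem.List.pyRange 1 (k + 1) 1).map (fun c =>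
          (Int.gcd c (Int.gcd a b : Int) : Int))).sum)).sum)).sum := by
  unfold solve
  calc
    (PySem.List.pyRange 1 (k + 1) 1).foldl (fun res a =>
        (PySem.List.pyRange 1 (k + 1) 1).foldl (fun res b =>
          let d : Int := (Int.gcd a b : Int)
          (PySem.List.pyRange 1 (k + 1) 1).foldl (fun res c =>
            res + (Int.gcd c d : Int)) res) res) 0
      = (PySem.List.pyRange 1 (k + 1) 1).foldl (fun res a =>
          res + ((PySem.List.pyRange 1 (k + 1) 1).map (fun b =>
            ((PySem.List.pyRange 1 (k + 1) 1).map (fun c =>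
              (Int.gcd c (Int.gcd a b : Int) : Int))).sum)).sum) 0 := by
        apply PySem.List.foldl_congr_mem
        intro res a _
        dsimp only
        calc
          (PySem.List.pyRange 1 (k + 1) 1).foldl (fun res b =>
              (PySem.List.pyRange 1 (k + 1) 1).foldl (fun res c =>
                res + (Int.gcd c (Int.gcd a b : Int) : Int)) res) res
            = (PySem.List.pyRange 1 (k + 1) 1).foldl (fun res b =>
                res + ((PySem.List.pyRange 1 (k + 1) 1).map (fun c =>
                  (Int.gcd c (Int.gcd a b : Int) : Int))).sum) res := by
              apply PySem.List.foldl_congr_mem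
              intro res' b _
              exact PySem.List.foldl_add _ _ _
          _ = res + ((PySem.List.pyRange 1 (k + 1) 1).map (fun b =>
                ((PySem.List.pyRange 1 (k + 1) 1).map (fun c =>
                  (Int.gcd c (Int.gcd a b : Int) : Int))).sum)).sum :=
              PySem.List.foldl_add _ _ _
    _ = 0 + ((PySem.List.pyRange 1 (k + 1) 1).map (fun a =>
          ((PySem.List.pyRange 1 (k + 1) 1).map (fun b =>
            ((PySem.List.pyRange 1 (k + 1) 1).map (fun c =>
              (Int.gcd c (Int.gcd a b : Int) : Int))).sum)).sum)).sum :=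
        PySem.List.foldl_add _ _ _
    _ = _ := by simp

-- ===== VERDICT (by name: the statement is the Claim_ definition above) =====
theorem solve_spec : Claim_equal_solve := by
  intro k _
  unfold Spec_solve solve_alt
  rw [pv_solve_eq_sum]
  refine congrArg List.sum (List.map_congr_left ?_)
  intro a ha
  refine congrArg List.sum (List.map_congr_left ?_)
  intro b _
  obtain ⟨h0, h1⟩ := pv_gcd_bound k a b ha
  rw [pv_table_lookup k _ h0 h1]
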